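-- pv_equiv track=rewrite | github.com/mouradtounsi2357/graphing_calculator | Erreur_expression_mathematique.py | var_operation_suc
-- ===== SOURCE A (Python) =====
-- def var_operation_suc(s):
--     operation=['+','-','*','/','^']
--     for i in range(0,len(s)-1,1):
--         for j in range(0,len(operation),1):
--             for  k in range(0,len(operation),1):
--                 if (s[i],s[i+1]) == (operation[j],operation[k]):
--                     return False
--     return True
-- ===== SOURCE B (Python) =====
-- def var_operation_suc(s):
--     # Stage 1: project the string onto a two-letter alphabet (operator mask).
--     mask = ''.join('x' if c in '+-*/^' else '.' for c in s)
--     # Stage 2: two consecutive operators exist iff the pattern 'xx' occurs in the mask.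
--     return 'xx' not in mask
-- ===== Notes on version B (the rewrite author's own statement) =====
-- stated objective: alternative
-- what changed: Replaced the triple nested index-pair loop by two staged passes: project the string onto an operator-mask over a two-letter alphabet, then a single substring search for a doubled operator mark.
import Mathlib
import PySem

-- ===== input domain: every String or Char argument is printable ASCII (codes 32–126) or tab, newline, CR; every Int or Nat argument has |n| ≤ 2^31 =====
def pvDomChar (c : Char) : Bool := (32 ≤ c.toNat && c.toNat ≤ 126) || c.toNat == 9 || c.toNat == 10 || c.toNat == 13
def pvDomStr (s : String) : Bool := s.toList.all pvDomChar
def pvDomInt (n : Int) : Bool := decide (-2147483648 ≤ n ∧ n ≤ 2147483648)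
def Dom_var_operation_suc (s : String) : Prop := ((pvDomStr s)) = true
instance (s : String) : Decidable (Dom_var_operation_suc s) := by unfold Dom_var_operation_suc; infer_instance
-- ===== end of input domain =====

-- B replaces A's triple nested index-pair loop by two staged passes: build an operator-mask
-- string over a two-letter alphabet, then a single substring search for a doubled operator mark.

-- ===== PORT A =====
-- the literal `operation` list of A
def pvOpsA : List Char := ['+', '-', '*', '/', '^']

-- innermost loop over k: returns `some false` on the first tuple match (Python's `return False`)
def pvLoopK (cs : List Char) (i : Int) (oj : Char) : List Char → Option Bool
  | [] => none
  | ok :: ks =>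
    if (PySem.List.pyGet? cs i, PySem.List.pyGet? cs (i + 1)) = (some oj, some ok) then some false
    else pvLoopK cs i oj ks

-- middle loop over j
def pvLoopJ (cs : List Char) (i : Int) : List Char → Option Bool
  | [] => none
  | oj :: js =>
    match pvLoopK cs i oj pvOpsA with
    | some b => some b
    | none => pvLoopJ cs i js

-- outer loop over i = range(0, len(s)-1, 1)
def pvLoopI (cs : List Char) : List Int → Option Bool
  | [] => none
  | i :: is =>
    match pvLoopJ cs i pvOpsA with
    | some b => some b
    | none => pvLoopI cs is

def var_operation_suc (s : String) : Bool :=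
  match pvLoopI s.toList (PySem.List.pyRange 0 ((s.toList.length : Int) - 1) 1) with
  | some b => b
  | none => true

-- ===== PORT B =====
-- mask = ''.join('x' if c in '+-*/^' else '.' for c in s)   (built on the List Char side)
def pvMask (cs : List Char) : List Char :=
  cs.map (fun c => if PySem.Chars.isIn [c] ['+', '-', '*', '/', '^'] then 'x' else '.')

-- return 'xx' not in mask
def var_operation_suc_alt (s : String) : Bool :=
  !(PySem.Chars.isIn ['x', 'x'] (pvMask s.toList))

-- ===== PRECONDITION & SPEC =====
def Spec_var_operation_suc (s : String) (out : Bool) : Prop := out = var_operation_suc_alt s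
instance (s : String) (out : Bool) : Decidable (Spec_var_operation_suc s out) := by unfold Spec_var_operation_suc; infer_instance

-- ===== CLAIM (what is proved, stated in full; the proofs are below) =====
def Claim_equal_var_operation_suc : Prop := ∀ (s : String), Dom_var_operation_suc s → Spec_var_operation_suc s (var_operation_suc s)

-- ===== LEMMAS AND PROOFS =====

theorem pvLoopK_eq (cs : List Char) (i : Int) (oj : Char) (ks : List Char) :
    pvLoopK cs i oj ks =
      if ks.any (fun ok => decide ((PySem.List.pyGet? cs i, PySem.List.pyGet? cs (i + 1)) = (some oj, some ok))) then some false else none := by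
  induction ks with
  | nil => simp [pvLoopK]
  | cons ok ks ih =>
    simp only [pvLoopK, ih, List.any_cons]
    by_cases h : (PySem.List.pyGet? cs i, PySem.List.pyGet? cs (i + 1)) = (some oj, some ok) <;> simp [h]

theorem pvLoopJ_eq (cs : List Char) (i : Int) (js : List Char) :
    pvLoopJ cs i js =
      if js.any (fun oj => pvOpsA.any (fun ok => decide ((PySem.List.pyGet? cs i, PySem.List.pyGet? cs (i + 1)) = (some oj, some ok)))) then some false else none := by
  induction js with
  | nil => simp [pvLoopJ]
  | cons oj js ih =>
    simp only [pvLoopJ, pvLoopK_eq, ih, List.any_cons]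
    by_cases h : ∃ x ∈ pvOpsA, PySem.List.pyGet? cs i = some oj ∧ PySem.List.pyGet? cs (i + 1) = some x <;> simp [h]

theorem pvLoopI_eq (cs : List Char) (is : List Int) :
    pvLoopI cs is =
      if is.any (fun i => pvOpsA.any (fun oj => pvOpsA.any (fun ok => decide ((PySem.List.pyGet? cs i, PySem.List.pyGet? cs (i + 1)) = (some oj, some ok))))) then some false else none := by
  induction is with
  | nil => simp [pvLoopI]
  | cons i is ih =>
    simp only [pvLoopI, pvLoopJ_eq, ih, List.any_cons]
    by_cases h : ∃ x ∈ pvOpsA, ∃ y ∈ pvOpsA, PySem.List.pyGet? cs i = some x ∧ PySem.List.pyGet? cs (i + 1) = some y <;> simp [h]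

-- A's result as the negation of an existence over the index range
theorem portA_char (s : String) :
    var_operation_suc s = true ↔
      ¬ ∃ i ∈ PySem.List.pyRange 0 ((s.toList.length : Int) - 1) 1,
          pvOpsA.any (fun oj => pvOpsA.any (fun ok => decide ((PySem.List.pyGet? s.toList i, PySem.List.pyGet? s.toList (i + 1)) = (some oj, some ok)))) = true := by
  unfold var_operation_suc
  rw [pvLoopI_eq]
  split_ifs with h
  · rw [List.any_eq_true] at h
    exact iff_of_false (by simp) (not_not_intro h)
  · rw [List.any_eq_true] at h
    exact iff_of_true rfl h

-- A's loop detects exactly: some adjacent pair of characters is an operator pair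
theorem sideA_iff (cs : List Char) :
    (∃ i ∈ PySem.List.pyRange 0 ((cs.length : Int) - 1) 1,
        (pvOpsA.any fun oj => pvOpsA.any fun ok =>
          decide ((PySem.List.pyGet? cs i, PySem.List.pyGet? cs (i + 1)) = (some oj, some ok))) = true)
      ↔ ∃ j : ℕ, ∃ _h : j + 1 < cs.length, cs[j] ∈ pvOpsA ∧ cs[j + 1] ∈ pvOpsA := by
  constructor
  · rintro ⟨i, hi, hbody⟩
    rw [PySem.List.mem_pyRange_one] at hi
    obtain ⟨h0, h1⟩ := hi
    lift i to ℕ using h0 with j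
    have hj : j + 1 < cs.length := by omega
    simp only [List.any_eq_true, decide_eq_true_eq, Prod.mk.injEq,
      PySem.List.pyGet?_natCast] at hbody
    obtain ⟨oj, hoj, ok, hok, e1, e2⟩ := hbody
    have e1' : cs[j]? = some cs[j] := List.getElem?_eq_getElem (by omega)
    have e2' : cs[j + 1]? = some cs[j + 1] := List.getElem?_eq_getElem hj
    rw [show ((j : ℤ) + 1) = ((j + 1 : ℕ) : ℤ) by push_cast; ring, PySem.List.pyGet?_natCast] at e2
    rw [e1'] at e1
    rw [e2'] at e2
    exact ⟨j, hj, by rw [Option.some.inj e1]; exact hoj, by rw [Option.some.inj e2]; exact hok⟩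
  · rintro ⟨j, hj, hm1, hm2⟩
    refine ⟨(j : ℤ), ?_, ?_⟩
    · rw [PySem.List.mem_pyRange_one]
      constructor
      · exact Int.natCast_nonneg j
      · omega
    · simp only [List.any_eq_true, decide_eq_true_eq, Prod.mk.injEq]
      refine ⟨cs[j], hm1, cs[j + 1], hm2, ?_, ?_⟩
      · rw [PySem.List.pyGet?_natCast, List.getElem?_eq_getElem (by omega)]
      · rw [show ((j : ℤ) + 1) = ((j + 1 : ℕ) : ℤ) by push_cast; ring,
          PySem.List.pyGet?_natCast, List.getElem?_eq_getElem hj]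

-- the mask test at one character: `c in '+-*/^'` is membership in pvOpsA
theorem mask_getElem (cs : List Char) (j : ℕ) (hj : j < cs.length) :
    (pvMask cs)[j]'(by simpa [pvMask] using hj) = (if cs[j] ∈ pvOpsA then 'x' else '.') := by
  simp only [pvMask, List.getElem_map]
  congr 1
  rw [eq_iff_iff, PySem.Chars.isIn_iff_infix]
  constructor
  · intro h
    have := h.subset (List.mem_singleton_self _)
    simpa [pvOpsA] using this
  · intro h
    obtain ⟨u, v, huv⟩ := List.append_of_mem (show cs[j] ∈ ['+', '-', '*', '/', '^'] by simpa [pvOpsA] using h)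
    exact ⟨u, v, by simpa using huv.symm⟩

-- "xx" occurs in the mask iff some adjacent pair of original characters is an operator pair
theorem sideB_iff (cs : List Char) :
    PySem.Chars.isIn ['x', 'x'] (pvMask cs) = true
      ↔ ∃ j : ℕ, ∃ _h : j + 1 < cs.length, cs[j] ∈ pvOpsA ∧ cs[j + 1] ∈ pvOpsA := by
  rw [← PySem.Chars.exists_prefix_drop_iff_isIn]
  have hlen : (pvMask cs).length = cs.length := by simp [pvMask]
  constructor
  · rintro ⟨j, hpre⟩
    obtain ⟨t, ht⟩ := hpre
    have ht' : (pvMask cs).drop j = 'x' :: 'x' :: t := ht.symm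
    have hj : j + 1 < cs.length := by
      have := congrArg List.length ht'
      rw [List.length_drop, hlen] at this
      simp only [List.length_cons] at this
      omega
    have h0 : (pvMask cs)[j]'(by omega) = 'x' := by
      have : ((pvMask cs).drop j)[0]'(by simp [ht']) = 'x' := by simp [ht']
      simpa using this
    have h1 : (pvMask cs)[j + 1]'(by omega) = 'x' := by
      have : ((pvMask cs).drop j)[1]'(by simp [ht']) = 'x' := by simp [ht']
      simpa using this
    rw [mask_getElem cs j (by omega)] at h0
    rw [mask_getElem cs (j + 1) hj] at h1
    refine ⟨j, hj, ?_, ?_⟩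
    · by_contra hc; simp [hc] at h0
    · by_contra hc; simp [hc] at h1
  · rintro ⟨j, hj, hm1, hm2⟩
    refine ⟨j, ?_⟩
    have h0 : (pvMask cs)[j]'(by omega) = 'x' := by rw [mask_getElem cs j (by omega)]; simp [hm1]
    have h1 : (pvMask cs)[j + 1]'(by omega) = 'x' := by rw [mask_getElem cs (j + 1) hj]; simp [hm2]
    have hd : (pvMask cs).drop j = 'x' :: 'x' :: (pvMask cs).drop (j + 2) := by
      rw [List.drop_eq_getElem_cons (by omega), h0]
      congr 1
      rw [List.drop_eq_getElem_cons (by rw [hlen]; omega), h1]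
    exact ⟨(pvMask cs).drop (j + 2), by rw [hd]; rfl⟩

-- ===== VERDICT (by name: the statement is the Claim_ definition above) =====
theorem var_operation_suc_spec : Claim_equal_var_operation_suc := by
  intro s _
  unfold Spec_var_operation_suc var_operation_suc_alt
  rw [Bool.eq_iff_iff, portA_char s, sideA_iff s.toList]
  simp only [Bool.not_eq_true', Bool.eq_false_iff]
  exact not_congr (sideB_iff s.toList).symm
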